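-- pv_equiv track=rewrite | github.com/whysiki/Calculation_of_earthwork_quantity | test/test_生成路径.py | find_zero_paths
-- ===== SOURCE A (Python) =====
-- def is_valid(x, y, grid):
--     n = len(grid)
--     m = len(grid[0])
--     return 0 <= x < n and 0 <= y < m
--
-- def dfs(x, y, grid, visited, path):
--     visited[x][y] = True
--     path.append((x, y))
--
--     # 定义四个方向的移动
--     directions = [(1, 0), (-1, 0), (0, 1), (0, -1)]
--
--     for dx, dy in directions:
--         nx, ny = x + dx, y + dy
--         if is_valid(nx, ny, grid) and not visited[nx][ny]:
--             dfs(nx, ny, grid, visited, path)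
--
-- def find_zero_paths(grid):
--     n = len(grid)
--     m = len(grid[0])
--     zero_paths = []
--
--     for i in range(n):
--         for j in range(m):
--             if grid[i][j] == 0:
--                 visited = [[False] * m for _ in range(n)]
--                 path = []
--                 dfs(i, j, grid, visited, path)
--                 zero_paths.append(path)
--
--     return zero_paths
-- ===== SOURCE B (Python) =====
-- def find_zero_paths(grid):
--     n, m = len(grid), len(grid[0])
--     directions = [(1, 0), (-1, 0), (0, 1), (0, -1)]
--     zero_paths = []
--     for i in range(n):
--         for j in range(m):
--             if grid[i][j] == 0:
--                 visited = set()
--                 path = []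
--                 stack = [(i, j)]
--                 while stack:
--                     x, y = stack.pop()
--                     if (x, y) in visited:
--                         continue
--                     visited.add((x, y))
--                     path.append((x, y))
--                     for dx, dy in reversed(directions):
--                         nx, ny = x + dx, y + dy
--                         if 0 <= nx < n and 0 <= ny < m:
--                             stack.append((nx, ny))
--                 zero_paths.append(path)
--     return zero_paths
-- ===== Notes on version B (the rewrite author's own statement) =====
-- stated objective: alternative
-- what changed: Replaces the recursive DFS over a boolean visited matrix by an iterative explicit-stack DFS with a visited set, marking and appending at pop time and pushing in-bounds neighbours in reversed direction order so the first-visit order is identical.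
import Mathlib
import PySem

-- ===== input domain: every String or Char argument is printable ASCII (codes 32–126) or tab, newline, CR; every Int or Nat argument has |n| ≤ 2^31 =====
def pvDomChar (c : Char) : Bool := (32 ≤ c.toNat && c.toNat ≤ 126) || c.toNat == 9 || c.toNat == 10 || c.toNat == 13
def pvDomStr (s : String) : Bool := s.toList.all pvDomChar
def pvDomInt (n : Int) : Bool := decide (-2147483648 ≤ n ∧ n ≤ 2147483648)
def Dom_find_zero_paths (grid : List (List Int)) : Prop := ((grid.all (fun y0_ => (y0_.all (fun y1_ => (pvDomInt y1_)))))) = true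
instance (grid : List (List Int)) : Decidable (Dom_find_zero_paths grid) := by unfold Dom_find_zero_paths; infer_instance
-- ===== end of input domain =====

-- B replaces A's recursive matrix-visited DFS by an iterative explicit-stack DFS with a
-- visited set (same preorder, no recursion); same asymptotic cost, different decomposition.

-- ===== PORT A =====

-- is_valid(x, y, grid)
def pvIsValid (x y : Int) (grid : List (List Int)) : Bool :=
  decide (0 ≤ x ∧ x < (grid.length : Int) ∧ 0 ≤ y ∧ y < ((grid.headD []).length : Int))

-- visited[x][y] read/write; only used under the is_valid guard (0 ≤ x, 0 ≤ y), where .toNat is exact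
def pvVGet (v : List (List Bool)) (x y : Int) : Bool :=
  (v.getD x.toNat []).getD y.toNat false

def pvVSet (v : List (List Bool)) (x y : Int) : List (List Bool) :=
  v.set x.toNat ((v.getD x.toNat []).set y.toNat true)

def pvDirs : List (Int × Int) := [(1, 0), (-1, 0), (0, 1), (0, -1)]

-- dfs(x, y, grid, visited, path); state = (visited, path); fuel only makes the recursion
-- structural — find_zero_paths supplies n*m+1, which the proof shows is never exhausted
def pvDfs (grid : List (List Int)) :
    Nat → Int → Int → (List (List Bool) × List (Int × Int)) → (List (List Bool) × List (Int × Int))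
  | 0, _, _, st => st
  | f + 1, x, y, st =>
    pvDirs.foldl
      (fun st d =>
        let nx := x + d.1
        let ny := y + d.2
        if pvIsValid nx ny grid && !pvVGet st.1 nx ny then pvDfs grid f nx ny st else st)
      (pvVSet st.1 x y, st.2 ++ [(x, y)])

def find_zero_paths (grid : List (List Int)) : List (List (Int × Int)) :=
  let n : Int := grid.length
  let m : Int := (grid.headD []).length
  (PySem.List.pyRange 0 n 1).foldl
    (fun acc i =>
      (PySem.List.pyRange 0 m 1).foldl
        (fun acc j =>
          if PySem.List.pyGetD (PySem.List.pyGetD grid i []) j 0 == 0 then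
            let visited := List.replicate grid.length (List.replicate (grid.headD []).length false)
            acc ++ [(pvDfs grid (grid.length * (grid.headD []).length + 1) i j (visited, [])).2]
          else acc)
        acc)
    []

-- ===== PORT B =====

-- the in-bounds neighbours, in direction-list order: B pushes them in reversed(directions)
-- order onto a LIFO stack, so the stack top-to-bottom (= Lean list head-to-tail) order is this
def pvNbrs (grid : List (List Int)) (x y : Int) : List (Int × Int) :=
  pvDirs.filterMap (fun d =>
    if pvIsValid (x + d.1) (y + d.2) grid then some (x + d.1, y + d.2) else none)

def pvBox (grid : List (List Int)) : Finset (Int × Int) :=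
  ((PySem.List.pyRange 0 grid.length 1).flatMap (fun i =>
    (PySem.List.pyRange 0 (grid.headD []).length 1).map (fun j => (i, j)))).toFinset

lemma pvIsValid_iff_mem_box (grid : List (List Int)) (c : Int × Int) :
    pvIsValid c.1 c.2 grid = true ↔ c ∈ pvBox grid := by
  simp only [pvIsValid, pvBox, List.mem_toFinset, List.mem_flatMap, List.mem_map,
    PySem.List.mem_pyRange_one, decide_eq_true_eq]
  constructor
  · rintro ⟨h1, h2, h3, h4⟩; exact ⟨c.1, ⟨h1, h2⟩, c.2, ⟨h3, h4⟩, rfl⟩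
  · rintro ⟨a, ha, b, hb, rfl⟩; exact ⟨ha.1, ha.2, hb.1, hb.2⟩

lemma pvNbrs_valid (grid : List (List Int)) (x y : Int) :
    ∀ c ∈ pvNbrs grid x y, pvIsValid c.1 c.2 grid = true := by
  intro c hc
  simp only [pvNbrs, List.mem_filterMap] at hc
  obtain ⟨d, -, hd⟩ := hc
  by_cases h : pvIsValid (x + d.1) (y + d.2) grid = true
  · simp [h] at hd; subst hd; exact h
  · simp [h] at hd

lemma pvNbrs_len (grid : List (List Int)) (x y : Int) : (pvNbrs grid x y).length ≤ 4 := by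
  have := List.length_filterMap_le
    (fun d => if pvIsValid (x + d.1) (y + d.2) grid then some (x + d.1, y + d.2) else none) pvDirs
  simpa [pvDirs] using this

lemma pvNbrs_noOut (grid : List (List Int)) (x y : Int) :
    ((pvNbrs grid x y).filter (fun c => !pvIsValid c.1 c.2 grid)).length = 0 := by
  rw [List.length_eq_zero_iff, List.filter_eq_nil_iff]
  intro c hc
  simp [pvNbrs_valid grid x y c hc]

lemma pvCard_drop (grid : List (List Int)) (s : PySem.Set (Int × Int)) (c : Int × Int)
    (hin : c ∈ pvBox grid) (hns : c ∉ s) :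
    ((pvBox grid) \ (s ++ [c]).toFinset).card < ((pvBox grid) \ s.toFinset).card := by
  apply Finset.card_lt_card
  constructor
  · intro a ha
    simp only [Finset.mem_sdiff, List.toFinset_append, Finset.mem_union, List.mem_toFinset] at ha ⊢
    exact ⟨ha.1, fun h => ha.2 (Or.inl h)⟩
  · intro hsub
    have h1 : c ∈ pvBox grid \ s.toFinset := by
      simp only [Finset.mem_sdiff, List.mem_toFinset]; exact ⟨hin, hns⟩
    have h2 := hsub h1
    simp only [Finset.mem_sdiff, List.toFinset_append, Finset.mem_union, List.mem_toFinset] at h2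
    exact h2.2 (Or.inr (by simp))

lemma pvCard_same (grid : List (List Int)) (s : PySem.Set (Int × Int)) (c : Int × Int)
    (hout : c ∉ pvBox grid) :
    ((pvBox grid) \ (s ++ [c]).toFinset).card = ((pvBox grid) \ s.toFinset).card := by
  congr 1
  ext a
  simp only [Finset.mem_sdiff, List.toFinset_append, Finset.mem_union, List.mem_toFinset,
    List.mem_singleton]
  constructor
  · rintro ⟨h1, h2⟩; exact ⟨h1, fun h => h2 (Or.inl h)⟩
  · rintro ⟨h1, h2⟩
    refine ⟨h1, fun h => ?_⟩
    rcases h with h | h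
    · exact h2 h
    · exact hout (h ▸ h1)

-- the iterative DFS loop: pop, skip if visited, else mark/append and push in-bounds neighbours
def pvRunB (grid : List (List Int)) (s : PySem.Set (Int × Int)) (p : List (Int × Int))
    (stack : List (Int × Int)) : List (Int × Int) :=
  match stack with
  | [] => p
  | c :: rest =>
    if PySem.Set.contains s c then pvRunB grid s p rest
    else pvRunB grid (PySem.Set.add s c) (p ++ [c]) (pvNbrs grid c.1 c.2 ++ rest)
termination_by
  stack.length + 5 * ((stack.filter (fun c => !pvIsValid c.1 c.2 grid)).length)
    + 9 * ((pvBox grid \ s.toFinset).card)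
decreasing_by
  · have hlc : (c :: rest).length = rest.length + 1 := by simp
    have hf : (List.filter (fun c => !pvIsValid c.1 c.2 grid) rest).length ≤
        (List.filter (fun c => !pvIsValid c.1 c.2 grid) (c :: rest)).length := by
      rw [List.filter_cons]; split <;> simp
    omega
  · rename_i hns0
    have hnotmem : c ∉ s := fun hm => hns0 ((PySem.Set.contains_iff s c).mpr hm)
    rw [PySem.Set.add_of_not_mem hnotmem]
    have hlen := pvNbrs_len grid c.1 c.2
    have hfa : (List.filter (fun c => !pvIsValid c.1 c.2 grid)
        (pvNbrs grid c.1 c.2 ++ rest)).length =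
        (List.filter (fun c => !pvIsValid c.1 c.2 grid) rest).length := by
      rw [List.filter_append, List.length_append, pvNbrs_noOut]
      omega
    have hlapp : (pvNbrs grid c.1 c.2 ++ rest).length =
        (pvNbrs grid c.1 c.2).length + rest.length := by simp
    have hlc : (c :: rest).length = rest.length + 1 := by simp
    by_cases hin : c ∈ pvBox grid
    · have hval : pvIsValid c.1 c.2 grid = true := (pvIsValid_iff_mem_box grid c).mpr hin
      have hfc : (List.filter (fun c => !pvIsValid c.1 c.2 grid) (c :: rest)).length =
          (List.filter (fun c => !pvIsValid c.1 c.2 grid) rest).length := by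
        rw [List.filter_cons]
        simp [hval]
      have hcard := pvCard_drop grid s c hin hnotmem
      omega
    · have hval : pvIsValid c.1 c.2 grid = false := by
        by_contra h
        exact hin ((pvIsValid_iff_mem_box grid c).mp (by simpa using h))
      have hfc : (List.filter (fun c => !pvIsValid c.1 c.2 grid) (c :: rest)).length =
          (List.filter (fun c => !pvIsValid c.1 c.2 grid) rest).length + 1 := by
        rw [List.filter_cons]
        simp [hval]
      have hcard := pvCard_same grid s c hin
      omega

def find_zero_paths_alt (grid : List (List Int)) : List (List (Int × Int)) :=
  let n : Int := grid.length
  let m : Int := (grid.headD []).length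
  (PySem.List.pyRange 0 n 1).foldl
    (fun acc i =>
      (PySem.List.pyRange 0 m 1).foldl
        (fun acc j =>
          if PySem.List.pyGetD (PySem.List.pyGetD grid i []) j 0 == 0 then
            acc ++ [pvRunB grid PySem.Set.empty [] [(i, j)]]
          else acc)
        acc)
    []

-- ===== PRECONDITION & SPEC =====
-- Pre_ excludes exactly the inputs on which the Python A raises: the empty grid
-- (len(grid[0]) is an IndexError) and ragged grids with a row shorter than row 0
-- (grid[i][j] is an IndexError for some j < len(grid[0])).
def Pre_find_zero_paths (grid : List (List Int)) : Prop :=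
  grid ≠ [] ∧ ∀ row ∈ grid, (grid.headD []).length ≤ row.length
instance (grid : List (List Int)) : Decidable (Pre_find_zero_paths grid) := by
  unfold Pre_find_zero_paths; infer_instance

def pvWitness_find_zero_paths : List (List Int) := [[0, 1], [1, 0]]

def Spec_find_zero_paths (grid : List (List Int)) (out : List (List (Int × Int))) : Prop :=
  out = find_zero_paths_alt grid
instance (grid : List (List Int)) (out : List (List (Int × Int))) :
    Decidable (Spec_find_zero_paths grid out) := by unfold Spec_find_zero_paths; infer_instance

-- ===== CLAIM (what is proved, stated in full; the proofs are below) =====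
def Claim_equal_find_zero_paths : Prop :=
  ∀ (grid : List (List Int)), Dom_find_zero_paths grid → Pre_find_zero_paths grid →
    Spec_find_zero_paths grid (find_zero_paths grid)

-- ===== LEMMAS AND PROOFS =====

-- visited matrix shape: n rows of length m
def pvShape (grid : List (List Int)) (v : List (List Bool)) : Prop :=
  v.length = grid.length ∧ ∀ r ∈ v, r.length = (grid.headD []).length

-- the visited set of B holds exactly the cells the visited matrix of A marks (on the box)
def pvCoh (grid : List (List Int)) (v : List (List Bool)) (s : PySem.Set (Int × Int)) : Prop :=
  ∀ c : Int × Int, pvIsValid c.1 c.2 grid = true → PySem.Set.contains s c = pvVGet v c.1 c.2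

-- number of unvisited cells
def pvU (v : List (List Bool)) : Nat := (v.map (fun r => r.count false)).sum

theorem pvRunB_nil (grid : List (List Int)) (s : PySem.Set (Int × Int)) (p : List (Int × Int)) :
    pvRunB grid s p [] = p := by rw [pvRunB]

theorem pvRunB_cons (grid : List (List Int)) (s : PySem.Set (Int × Int)) (p : List (Int × Int))
    (c : Int × Int) (rest : List (Int × Int)) :
    pvRunB grid s p (c :: rest) =
      if PySem.Set.contains s c then pvRunB grid s p rest
      else pvRunB grid (PySem.Set.add s c) (p ++ [c]) (pvNbrs grid c.1 c.2 ++ rest) := by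
  rw [pvRunB]

lemma pvValid_bounds (grid : List (List Int)) (x y : Int) (h : pvIsValid x y grid = true) :
    0 ≤ x ∧ x.toNat < grid.length ∧ 0 ≤ y ∧ y.toNat < (grid.headD []).length := by
  simp only [pvIsValid, decide_eq_true_eq] at h
  omega

lemma pvGetD_set_self {α : Type} (l : List α) (k : Nat) (a : α) (d : α) (hk : k < l.length) :
    (l.set k a).getD k d = a := by
  rw [List.getD_eq_getElem?_getD, List.getElem?_set_self (by simpa using hk)]
  rfl

lemma pvGetD_set_ne {α : Type} (l : List α) (k k' : Nat) (a : α) (d : α) (h : k ≠ k') :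
    (l.set k a).getD k' d = l.getD k' d := by
  rw [List.getD_eq_getElem?_getD, List.getElem?_set_ne h, ← List.getD_eq_getElem?_getD]

lemma pvShape_set (grid : List (List Int)) (v : List (List Bool)) (x y : Int)
    (hs : pvShape grid v) (hv : pvIsValid x y grid = true) :
    pvShape grid (pvVSet v x y) := by
  obtain ⟨hl, hr⟩ := hs
  obtain ⟨_, hx, _, hy⟩ := pvValid_bounds grid x y hv
  constructor
  · simp [pvVSet, hl]
  · intro r hrm
    rcases List.mem_or_eq_of_mem_set hrm with h | h
    · exact hr r h
    · subst h
      have hxv : x.toNat < v.length := by omega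
      have : v.getD x.toNat [] = v[x.toNat] := by
        rw [List.getD_eq_getElem?_getD, List.getElem?_eq_getElem hxv]; rfl
      rw [this, List.length_set]
      exact hr _ (List.getElem_mem hxv)

lemma pvVGet_set_self (grid : List (List Int)) (v : List (List Bool)) (x y : Int)
    (hs : pvShape grid v) (hv : pvIsValid x y grid = true) :
    pvVGet (pvVSet v x y) x y = true := by
  obtain ⟨hl, hr⟩ := hs
  obtain ⟨_, hx, _, hy⟩ := pvValid_bounds grid x y hv
  have hxv : x.toNat < v.length := by omega
  have hrow : v.getD x.toNat [] = v[x.toNat] := by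
    rw [List.getD_eq_getElem?_getD, List.getElem?_eq_getElem hxv]; rfl
  have hyr : y.toNat < (v[x.toNat]).length := by
    rw [hr _ (List.getElem_mem hxv)]; omega
  simp only [pvVGet, pvVSet, hrow]
  rw [pvGetD_set_self _ _ _ _ (by simpa [List.length_set] using hxv),
    pvGetD_set_self _ _ _ _ hyr]

lemma pvVGet_set_other (grid : List (List Int)) (v : List (List Bool)) (x y a b : Int)
    (hs : pvShape grid v) (hv : pvIsValid x y grid = true) (hv' : pvIsValid a b grid = true)
    (hne : ¬(a = x ∧ b = y)) :
    pvVGet (pvVSet v x y) a b = pvVGet v a b := by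
  obtain ⟨hl, hr⟩ := hs
  obtain ⟨hx0, hx, hy0, hy⟩ := pvValid_bounds grid x y hv
  obtain ⟨ha0, ha, hb0, hb⟩ := pvValid_bounds grid a b hv'
  have hxv : x.toNat < v.length := by omega
  have hrow : v.getD x.toNat [] = v[x.toNat] := by
    rw [List.getD_eq_getElem?_getD, List.getElem?_eq_getElem hxv]; rfl
  by_cases hax : a = x
  · subst hax
    have hby : b ≠ y := by tauto
    have hbt : y.toNat ≠ b.toNat := by omega
    simp only [pvVGet, pvVSet, hrow]
    rw [pvGetD_set_self _ _ _ _ (by simpa [List.length_set] using hxv),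
      pvGetD_set_ne _ _ _ _ _ hbt]
  · have hat : x.toNat ≠ a.toNat := by omega
    simp only [pvVGet, pvVSet]
    rw [pvGetD_set_ne _ _ _ _ _ hat]

lemma pvList_count_set (l : List Bool) (k : Nat) (hk : k < l.length) (hf : l[k] = false) :
    (l.set k true).count false + 1 = l.count false := by
  induction l generalizing k with
  | nil => simp at hk
  | cons a t ih =>
    cases k with
    | zero =>
      simp at hf; subst hf
      simp
    | succ k =>
      simp at hk hf
      simp only [List.set_cons_succ, List.count_cons]
      have := ih k hk hf
      omega

lemma pvSum_map_set (v : List (List Bool)) (k : Nat) (r : List Bool) (hk : k < v.length) :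
    ((v.set k r).map (fun r => r.count false)).sum + (v[k]).count false
      = (v.map (fun r => r.count false)).sum + r.count false := by
  induction v generalizing k with
  | nil => simp at hk
  | cons a t ih =>
    cases k with
    | zero =>
      simp only [List.set_cons_zero, List.map_cons, List.sum_cons, List.getElem_cons_zero]
      omega
    | succ k =>
      simp only [List.length_cons, Nat.add_lt_add_iff_right] at hk
      have := ih k hk
      simp only [List.set_cons_succ, List.map_cons, List.sum_cons, List.getElem_cons_succ]
      omega

lemma pvU_set (grid : List (List Int)) (v : List (List Bool)) (x y : Int)
    (hs : pvShape grid v) (hv : pvIsValid x y grid = true) (hg : pvVGet v x y = false) :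
    pvU (pvVSet v x y) + 1 = pvU v := by
  obtain ⟨hl, hr⟩ := hs
  obtain ⟨hx0, hx, hy0, hy⟩ := pvValid_bounds grid x y hv
  have hxv : x.toNat < v.length := by omega
  have hrow : v.getD x.toNat [] = v[x.toNat] := by
    rw [List.getD_eq_getElem?_getD, List.getElem?_eq_getElem hxv]; rfl
  have hyr : y.toNat < (v[x.toNat]).length := by
    rw [hr _ (List.getElem_mem hxv)]; omega
  have hgf : (v[x.toNat])[y.toNat] = false := by
    simp only [pvVGet, hrow] at hg
    rw [List.getD_eq_getElem?_getD, List.getElem?_eq_getElem hyr] at hg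
    simpa using hg
  have hc := pvList_count_set (v[x.toNat]) y.toNat hyr hgf
  have hsum := pvSum_map_set v x.toNat ((v[x.toNat]).set y.toNat true) hxv
  simp only [pvU, pvVSet, hrow]
  omega

lemma pvU_pos (grid : List (List Int)) (v : List (List Bool)) (x y : Int)
    (hs : pvShape grid v) (hv : pvIsValid x y grid = true) (hg : pvVGet v x y = false) :
    1 ≤ pvU v := by
  obtain ⟨hl, hr⟩ := hs
  obtain ⟨hx0, hx, hy0, hy⟩ := pvValid_bounds grid x y hv
  have hxv : x.toNat < v.length := by omega
  have hrow : v.getD x.toNat [] = v[x.toNat] := by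
    rw [List.getD_eq_getElem?_getD, List.getElem?_eq_getElem hxv]; rfl
  have hyr : y.toNat < (v[x.toNat]).length := by
    rw [hr _ (List.getElem_mem hxv)]; omega
  have hgf : (v[x.toNat])[y.toNat] = false := by
    simp only [pvVGet, hrow] at hg
    rw [List.getD_eq_getElem?_getD, List.getElem?_eq_getElem hyr] at hg
    simpa using hg
  have hmem : false ∈ v[x.toNat] := hgf ▸ List.getElem_mem hyr
  have hcpos : 0 < (v[x.toNat]).count false := List.count_pos_iff.mpr hmem
  have hle : (v[x.toNat]).count false ≤ (v.map (fun r => r.count false)).sum :=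
    List.single_le_sum (by simp) _ (List.mem_map_of_mem (List.getElem_mem hxv))
  simp only [pvU]
  omega

lemma pvCoh_add (grid : List (List Int)) (v : List (List Bool)) (s : PySem.Set (Int × Int))
    (x y : Int) (hc : pvCoh grid v s) (hs : pvShape grid v) (hv : pvIsValid x y grid = true) :
    pvCoh grid (pvVSet v x y) (PySem.Set.add s (x, y)) := by
  rintro ⟨a, b⟩ hcv
  by_cases h : (a, b) = ((x, y) : Int × Int)
  · rw [(Prod.mk.injEq ..).mp h |>.1, (Prod.mk.injEq ..).mp h |>.2]
    rw [show ((x, y) : Int × Int).1 = x from rfl, show ((x, y) : Int × Int).2 = y from rfl]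
    rw [pvVGet_set_self grid v x y hs hv]
    exact (PySem.Set.contains_iff _ _).mpr ((PySem.Set.mem_add _ _ _).mpr (Or.inr rfl))
  · have hne : ¬(a = x ∧ b = y) := by
      intro ⟨h1, h2⟩; exact h (by rw [h1, h2])
    show PySem.Set.contains (PySem.Set.add s (x, y)) (a, b) = pvVGet (pvVSet v x y) a b
    rw [pvVGet_set_other grid v x y a b hs hv hcv hne, ← hc (a, b) hcv]
    rw [Bool.eq_iff_iff]
    simp only [PySem.Set.contains_iff, PySem.Set.mem_add]
    constructor
    · rintro (hm | hm)
      · exact hm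
      · exact absurd hm h
    · exact Or.inl

-- the single-cell bridging statement, by fuel
def pvP (grid : List (List Int)) (f : Nat) : Prop :=
  ∀ (x y : Int) (v : List (List Bool)) (p : List (Int × Int)) (s : PySem.Set (Int × Int)),
    pvShape grid v → pvCoh grid v s → pvIsValid x y grid = true → pvVGet v x y = false →
    pvU v ≤ f →
    ∃ s' : PySem.Set (Int × Int),
      pvShape grid (pvDfs grid f x y (v, p)).1 ∧
      pvCoh grid (pvDfs grid f x y (v, p)).1 s' ∧
      pvU (pvDfs grid f x y (v, p)).1 + 1 ≤ pvU v ∧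
      ∀ rest, pvRunB grid s p ((x, y) :: rest) = pvRunB grid s' (pvDfs grid f x y (v, p)).2 rest

lemma pvFoldDirs (grid : List (List Int)) (f : Nat) (x y : Int) (ds : List (Int × Int))
    (st : List (List Bool) × List (Int × Int)) :
    ds.foldl
      (fun st d =>
        let nx := x + d.1
        let ny := y + d.2
        if pvIsValid nx ny grid && !pvVGet st.1 nx ny then pvDfs grid f nx ny st else st) st
    = (ds.filterMap (fun d =>
        if pvIsValid (x + d.1) (y + d.2) grid then some (x + d.1, y + d.2) else none)).foldl
        (fun st c => if !pvVGet st.1 c.1 c.2 then pvDfs grid f c.1 c.2 st else st) st := by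
  induction ds generalizing st with
  | nil => rfl
  | cons d ds ih =>
    simp only [List.foldl_cons, List.filterMap_cons]
    by_cases hval : pvIsValid (x + d.1) (y + d.2) grid = true
    · rw [if_pos hval]
      simp only [hval, Bool.true_and, List.foldl_cons]
      exact ih _
    · have hval' : pvIsValid (x + d.1) (y + d.2) grid = false := by simpa using hval
      rw [if_neg (by simp [hval'])]
      simp only [hval', Bool.false_eq_true, if_false]
      exact ih st

-- pvDfs (f+1) is a fold of guarded pvDfs f over the in-bounds neighbour cells
lemma pvDfs_succ_eq (grid : List (List Int)) (f : Nat) (x y : Int)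
    (v : List (List Bool)) (p : List (Int × Int)) :
    pvDfs grid (f + 1) x y (v, p) =
      (pvNbrs grid x y).foldl
        (fun st c => if !pvVGet st.1 c.1 c.2 then pvDfs grid f c.1 c.2 st else st)
        (pvVSet v x y, p ++ [(x, y)]) := by
  rw [pvDfs, pvNbrs, pvFoldDirs]

lemma pvFold (grid : List (List Int)) (f : Nat) (hP : pvP grid f) :
    ∀ (q : List (Int × Int)) (v : List (List Bool)) (p : List (Int × Int))
      (s : PySem.Set (Int × Int)),
      pvShape grid v → pvCoh grid v s → (∀ c ∈ q, pvIsValid c.1 c.2 grid = true) → pvU v ≤ f →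
      ∃ s' : PySem.Set (Int × Int),
        pvShape grid ((q.foldl
          (fun st c => if !pvVGet st.1 c.1 c.2 then pvDfs grid f c.1 c.2 st else st) (v, p)).1) ∧
        pvCoh grid ((q.foldl
          (fun st c => if !pvVGet st.1 c.1 c.2 then pvDfs grid f c.1 c.2 st else st) (v, p)).1) s' ∧
        pvU ((q.foldl
          (fun st c => if !pvVGet st.1 c.1 c.2 then pvDfs grid f c.1 c.2 st else st) (v, p)).1)
          ≤ pvU v ∧
        ∀ rest, pvRunB grid s p (q ++ rest) =
          pvRunB grid s' ((q.foldl
            (fun st c => if !pvVGet st.1 c.1 c.2 then pvDfs grid f c.1 c.2 st else st) (v, p)).2)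
            rest := by
  intro q
  induction q with
  | nil =>
    intro v p s hs hc _ hU
    exact ⟨s, hs, hc, le_refl _, fun rest => by simp⟩
  | cons c q' ih =>
    intro v p s hs hc hq hU
    have hcv : pvIsValid c.1 c.2 grid = true := hq c (List.mem_cons_self ..)
    have hq' : ∀ c ∈ q', pvIsValid c.1 c.2 grid = true :=
      fun d hd => hq d (List.mem_cons_of_mem _ hd)
    cases hg : pvVGet v c.1 c.2 with
    | true =>
      have hstep : (if !pvVGet v c.1 c.2 then pvDfs grid f c.1 c.2 (v, p) else (v, p)) = (v, p) := by
        simp [hg]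
      obtain ⟨s', h1, h2, h3, h4⟩ := ih v p s hs hc hq' hU
      refine ⟨s', ?_, ?_, ?_, ?_⟩ <;> simp only [List.foldl_cons, hstep]
      · exact h1
      · exact h2
      · exact h3
      · intro rest
        have hcs : PySem.Set.contains s c = true := by rw [hc c hcv]; exact hg
        rw [List.cons_append, pvRunB_cons, if_pos hcs]
        exact h4 rest
    | false =>
      obtain ⟨s₁, hs₁, hc₁, hU₁, hrun₁⟩ := hP c.1 c.2 v p s hs hc hcv hg hU
      set st₁ := pvDfs grid f c.1 c.2 (v, p) with hst₁
      have hstep : (if !pvVGet v c.1 c.2 then pvDfs grid f c.1 c.2 (v, p) else (v, p)) = st₁ := by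
        simp [hg, hst₁]
      obtain ⟨s₂, h1, h2, h3, h4⟩ := ih st₁.1 st₁.2 s₁ hs₁ hc₁ hq' (by omega)
      simp only [Prod.mk.eta] at h1 h2 h3 h4
      refine ⟨s₂, ?_, ?_, ?_, ?_⟩ <;> simp only [List.foldl_cons, hstep]
      · exact h1
      · exact h2
      · omega
      · intro rest
        rw [List.cons_append, hrun₁ (q' ++ rest)]
        exact h4 rest

lemma pvP_all (grid : List (List Int)) : ∀ f, pvP grid f := by
  intro f
  induction f with
  | zero =>
    intro x y v p s hs hc hv hg hU
    have := pvU_pos grid v x y hs hv hg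
    omega
  | succ f ih =>
    intro x y v p s hs hc hv hg hU
    have hs1 : pvShape grid (pvVSet v x y) := pvShape_set grid v x y hs hv
    have hU1 : pvU (pvVSet v x y) + 1 = pvU v := pvU_set grid v x y hs hv hg
    have hc1 : pvCoh grid (pvVSet v x y) (PySem.Set.add s (x, y)) := pvCoh_add grid v s x y hc hs hv
    obtain ⟨s', h1, h2, h3, h4⟩ := pvFold grid f ih (pvNbrs grid x y) (pvVSet v x y)
      (p ++ [(x, y)]) (PySem.Set.add s (x, y)) hs1 hc1 (pvNbrs_valid grid x y) (by omega)
    rw [← pvDfs_succ_eq] at h1 h2 h3 h4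
    refine ⟨s', h1, h2, by omega, ?_⟩
    intro rest
    have hcs : PySem.Set.contains s (x, y) = false := by
      rw [hc (x, y) hv]; exact hg
    rw [pvRunB_cons, if_neg (by rw [hcs]; simp)]
    simpa using h4 rest

lemma pvFresh_get (grid : List (List Int)) (a b : Int) :
    pvVGet (List.replicate grid.length (List.replicate (grid.headD []).length false)) a b
      = false := by
  simp only [pvVGet, List.getD_eq_getElem?_getD, List.getElem?_replicate]
  split
  · simp only [Option.getD_some, List.getElem?_replicate]
    split <;> simp
  · simp

lemma pvFresh_shape (grid : List (List Int)) :
    pvShape grid (List.replicate grid.length (List.replicate (grid.headD []).length false)) := by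
  constructor
  · simp
  · intro r hr
    rw [List.eq_of_mem_replicate hr]
    simp

lemma pvFresh_U (grid : List (List Int)) :
    pvU (List.replicate grid.length (List.replicate (grid.headD []).length false))
      = grid.length * (grid.headD []).length := by
  simp [pvU, List.map_replicate, List.sum_replicate, smul_eq_mul]

-- the two entry points append the same path for every cell of the box
lemma pvPath_eq (grid : List (List Int)) (i j : Int)
    (hi : 0 ≤ i ∧ i < (grid.length : Int)) (hj : 0 ≤ j ∧ j < ((grid.headD []).length : Int)) :
    (pvDfs grid (grid.length * (grid.headD []).length + 1) i j
      (List.replicate grid.length (List.replicate (grid.headD []).length false), [])).2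
      = pvRunB grid PySem.Set.empty [] [(i, j)] := by
  have hv : pvIsValid i j grid = true := by
    simp only [pvIsValid, decide_eq_true_eq]
    exact ⟨hi.1, hi.2, hj.1, hj.2⟩
  have hcoh : pvCoh grid (List.replicate grid.length
      (List.replicate (grid.headD []).length false)) PySem.Set.empty := by
    intro c _
    rw [pvFresh_get]
    rfl
  obtain ⟨s', _, _, _, h4⟩ := pvP_all grid (grid.length * (grid.headD []).length + 1) i j
    (List.replicate grid.length (List.replicate (grid.headD []).length false)) [] PySem.Set.empty
    (pvFresh_shape grid) hcoh hv (pvFresh_get grid i j) (by rw [pvFresh_U]; omega)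
  have h5 := h4 []
  rw [pvRunB_nil] at h5
  exact h5.symm

-- ===== VERDICT (by name: the statement is the Claim_ definition above) =====
theorem find_zero_paths_spec : Claim_equal_find_zero_paths := by
  intro grid _ _
  show find_zero_paths grid = find_zero_paths_alt grid
  unfold find_zero_paths find_zero_paths_alt
  apply List.foldl_ext
  intro acc i hi
  apply List.foldl_ext
  intro acc' j hj
  rw [PySem.List.mem_pyRange_one] at hi hj
  split_ifs
  · show acc' ++ [(pvDfs grid (grid.length * (grid.headD []).length + 1) i j
      (List.replicate grid.length (List.replicate (grid.headD []).length false), [])).2]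
      = acc' ++ [pvRunB grid PySem.Set.empty [] [(i, j)]]
    rw [pvPath_eq grid i j hi hj]
  · rfl
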